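-- pv_equiv track=rewrite | github.com/meh9184/coding-test-practice | codility/problem_2.py | solution
-- ===== SOURCE A (Python) =====
-- def solution(S, K):
--
--     _str = S
--     _arr = S.split(" ")
--
--     _stack = []
--
--     for _i, _v in enumerate(_arr):
--         if len(_v) > K:
--             return -1
--         elif len(_stack) > 0:
--             _pop = _stack.pop()
--             if len(_pop) + len(_v) + 1 <= K:
--                 _stack.append(_pop+" "+_v)
--             else:
--                 _stack.append(_pop)
--                 _stack.append(_v)
--
--         else:
--             _stack.append(_v)
--
--     return len(_stack)
-- ===== SOURCE B (Python) =====
-- def solution(S, K):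
--     words = S.split(" ")
--     lens = [len(w) for w in words]
--     if any(l > K for l in lens):
--         return -1
--     # prefix sums: pref[j] = sum of lens[:j]) + j, so a line covering words
--     # i..j-1 has rendered length pref[j] - pref[i] - 1
--     pref = [0]
--     for l in lens:
--         pref.append(pref[-1] + l + 1)
--     n = len(words)
--     count = 0
--     i = 0
--     while i < n:
--         # the greedy line starting at word i ends before the largest j with
--         # pref[j] <= pref[i] + K + 1; binary search for it (pref is increasing)
--         limit = pref[i] + K + 1
--         lo, hi = i + 1, n
--         while lo < hi:
--             mid = (lo + hi + 1) // 2
--             if pref[mid] <= limit: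
--                 lo = mid
--             else:
--                 hi = mid - 1
--         count += 1
--         i = lo
--     return count
-- ===== Notes on version B (the rewrite author's own statement) =====
-- stated objective: alternative
-- what changed: B replaces A's word-by-word greedy stack of concatenated line strings by a prefix-sum array of word lengths and, per line, a binary search for the furthest word whose prefix sum still fits, jumping line by line instead of folding word by word.
import Mathlib
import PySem

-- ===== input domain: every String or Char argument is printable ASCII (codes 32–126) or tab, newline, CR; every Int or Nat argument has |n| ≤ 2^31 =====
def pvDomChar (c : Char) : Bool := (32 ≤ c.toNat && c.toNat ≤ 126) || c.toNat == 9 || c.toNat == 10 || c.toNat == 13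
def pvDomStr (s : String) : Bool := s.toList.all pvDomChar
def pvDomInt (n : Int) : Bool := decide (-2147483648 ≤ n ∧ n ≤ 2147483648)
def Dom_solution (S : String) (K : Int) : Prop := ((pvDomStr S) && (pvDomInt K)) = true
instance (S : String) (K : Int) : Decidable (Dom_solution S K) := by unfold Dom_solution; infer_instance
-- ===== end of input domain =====

-- B computes line breaks by binary search on a prefix-sum array of word lengths instead of A's per-word greedy stack of concatenated line strings (alternative algorithm, similar cost).

-- ===== PORT A =====
-- the for-loop over enumerate(_arr) with its early 'return -1', as structural recursion
def solGoA (K : Int) : List (List Char) → List (Int × List Char) → Int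
  | stack, [] => (stack.length : Int)
  | stack, (_, v) :: rest =>
    if (v.length : Int) > K then -1
    else if stack.length > 0 then
      match PySem.List.pop? stack with
      | some (p, st) =>
        if (p.length : Int) + (v.length : Int) + 1 ≤ K then
          solGoA K (st ++ [p ++ [' '] ++ v]) rest
        else
          solGoA K (st ++ [p] ++ [v]) rest
      | none => 0  -- unreachable: guarded by len(_stack) > 0
    else
      solGoA K (stack ++ [v]) rest

def solution (S : String) (K : Int) : Int :=
  let arr := PySem.Chars.splitOn S.toList " ".toList
  solGoA K [] (PySem.List.enumerate arr)

-- ===== PORT B =====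
-- inner while-loop: binary search for the largest j in [lo, hi] with pref[j] <= limit
-- (pref[mid] is always in range: mid <= hi = n < pref.length, so getD is exact;
--  fuel only makes the recursion structural: hi - lo shrinks each step, so any
--  fuel >= hi - lo runs the loop to completion)
def bsrB (pref : List Int) (limit : Int) : Nat → Nat → Nat → Nat
  | 0, lo, _ => lo
  | fuel + 1, lo, hi =>
    if lo < hi then
      if pref.getD ((lo + hi + 1) / 2) 0 ≤ limit then bsrB pref limit fuel ((lo + hi + 1) / 2) hi
      else bsrB pref limit fuel lo ((lo + hi + 1) / 2 - 1)
    else lo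

-- outer while-loop over i, counting lines (fuel n suffices: i advances by at least 1 each pass)
def outerB (pref : List Int) (K : Int) (n : Nat) : Nat → Nat → Int → Int
  | 0, _, count => count
  | fuel + 1, i, count =>
    if i < n then
      outerB pref K n fuel (bsrB pref (pref.getD i 0 + K + 1) n (i + 1) n) (count + 1)
    else count

def solution_alt (S : String) (K : Int) : Int :=
  let ws := PySem.Chars.splitOn S.toList " ".toList
  let lens := ws.map (fun w => (w.length : Int))
  if lens.any (fun l => l > K) then -1
  else
    -- pref = [0]; for l in lens: pref.append(pref[-1] + l + 1)
    -- (pref[-1] on the always-nonempty accumulator is getLastD 0: exact)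
    let pref := lens.foldl (fun p l => p ++ [p.getLastD 0 + l + 1]) [0]
    outerB pref K ws.length ws.length 0 0

-- ===== PRECONDITION & SPEC =====
def Spec_solution (S : String) (K : Int) (out : Int) : Prop := out = solution_alt S K
instance (S : String) (K : Int) (out : Int) : Decidable (Spec_solution S K out) := by unfold Spec_solution; infer_instance

-- ===== CLAIM (what is proved, stated in full; the proofs are below) =====
def Claim_equal_solution : Prop := ∀ (S : String) (K : Int), Dom_solution S K → Spec_solution S K (solution S K)

-- ===== LEMMAS AND PROOFS =====

theorem pop_last (st : List (List Char)) (t : List Char) :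
    PySem.List.pop? (st ++ [t]) = some (t, st) := by
  simpa using PySem.List.pop?_last (xs := st) (x := t)

-- If some remaining word is longer than K, A's loop returns -1 whatever the stack is.
theorem solGoA_long (K : Int) (ws : List (Int × List Char)) (h : ∃ p ∈ ws, (p.2.length : Int) > K) :
    ∀ stack : List (List Char), solGoA K stack ws = -1 := by
  induction ws with
  | nil => rcases h with ⟨p, hp, _⟩; cases hp
  | cons hd tl ih =>
    intro stack
    rcases h with ⟨p, hp, hlen⟩
    rcases hd with ⟨i, v⟩
    by_cases hv : (v.length : Int) > K
    · simp [solGoA, hv]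
    · have htl : ∃ q ∈ tl, (q.2.length : Int) > K := by
        rcases List.mem_cons.mp hp with h1 | h1
        · exact absurd (by simpa [h1] using hlen) hv
        · exact ⟨p, h1, hlen⟩
      have ih' := ih htl
      simp only [solGoA, hv, if_false]
      split_ifs with hs
      · rcases List.eq_nil_or_concat stack with rfl | ⟨st0, t0, rfl⟩
        · simp at hs
        · rw [List.concat_eq_append, pop_last]
          dsimp only
          split_ifs <;> exact ih' _
      · exact ih' _

-- B's greedy decision on scalar state (proof-side bridge between the two ports)
def stepL (K : Int) (st : Int × Option Int) (l : Int) : Int × Option Int :=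
  match st.2 with
  | some cur => if cur + l + 1 ≤ K then (st.1, some (cur + l + 1)) else (st.1 + 1, some l)
  | none => (st.1 + 1, some l)

-- Invariant: a nonempty stack is determined, for the rest of the run, by its size and
-- the length of its last line.
theorem solGoA_inv (K : Int) (ws : List (Int × List Char))
    (h : ∀ p ∈ ws, ¬ ((p.2.length : Int) > K)) :
    ∀ (st : List (List Char)) (t : List Char),
      solGoA K (st ++ [t]) ws
        = ((ws.map (fun p => (p.2.length : Int))).foldl (stepL K) ((st.length : Int) + 1, some ((t.length : Int)))).1 := by
  induction ws with
  | nil => intro st t; simp [solGoA]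
  | cons hd tl ih =>
    intro st t
    rcases hd with ⟨i, v⟩
    have hv : ¬ ((v.length : Int) > K) := h (i, v) (List.mem_cons_self)
    have htl : ∀ p ∈ tl, ¬ ((p.2.length : Int) > K) := fun p hp => h p (List.mem_cons_of_mem _ hp)
    have hlen : (st ++ [t]).length > 0 := by simp
    simp only [solGoA, hv, if_false, hlen, if_true, pop_last]
    by_cases hfit : (t.length : Int) + (v.length : Int) + 1 ≤ K
    · have hstep : stepL K ((st.length : Int) + 1, some ((t.length : Int))) (v.length : Int)
          = ((st.length : Int) + 1, some (((t ++ [' '] ++ v).length : Int))) := by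
        simp only [stepL, hfit, if_true, Prod.mk.injEq, Option.some.injEq,
          List.length_append, List.length_cons, List.length_nil]
        push_cast [List.length_append, List.length_cons, List.length_nil]
        exact ⟨trivial, by ring⟩
      rw [if_pos hfit, ih htl st (t ++ [' '] ++ v), List.map_cons, List.foldl_cons, hstep]
    · have hstep : stepL K ((st.length : Int) + 1, some ((t.length : Int))) (v.length : Int)
          = (((st ++ [t]).length : Int) + 1, some ((v.length : Int))) := by
        simp only [stepL, hfit, if_false, Prod.mk.injEq,
          List.length_append, List.length_cons, List.length_nil]
        push_cast [List.length_append, List.length_cons, List.length_nil]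
        exact ⟨rfl, trivial⟩
      rw [if_neg hfit, show st ++ [t] ++ [v] = (st ++ [t]) ++ [v] from rfl,
        ih htl (st ++ [t]) v, List.map_cons, List.foldl_cons, hstep]

-- abstract prefix list, for reasoning about B's pref fold
def mkPref (s : Int) : List Int → List Int
  | [] => []
  | l :: ls => (s + l + 1) :: mkPref (s + l + 1) ls

theorem pref_fold (ls : List Int) : ∀ acc : List Int, acc ≠ [] →
    ls.foldl (fun p l => p ++ [p.getLastD 0 + l + 1]) acc = acc ++ mkPref (acc.getLastD 0) ls := by
  induction ls with
  | nil => intro acc _; simp [mkPref]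
  | cons l ls ih =>
    intro acc hacc
    have h1 : (acc ++ [acc.getLastD 0 + l + 1]).getLastD 0 = acc.getLastD 0 + l + 1 := by
      simp
    rw [List.foldl_cons, ih _ (by simp), h1, mkPref]
    simp

theorem mkPref_succ : ∀ (ls : List Int) (s : Int) (j : Nat), j < ls.length →
    (s :: mkPref s ls).getD (j + 1) 0 = (s :: mkPref s ls).getD j 0 + ls.getD j 0 + 1 := by
  intro ls
  induction ls with
  | nil => intro s j h; simp at h
  | cons l ls ih =>
    intro s j h
    cases j with
    | zero => simp [mkPref]
    | succ j =>
      have := ih (s + l + 1) j (by simpa using h)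
      simpa [mkPref] using this

theorem pref_mono (pref : List Int) (n : Nat)
    (hstep : ∀ j, j < n → pref.getD j 0 + 1 ≤ pref.getD (j + 1) 0) :
    ∀ (d j : Nat), j + d ≤ n → pref.getD j 0 + d ≤ pref.getD (j + d) 0 := by
  intro d
  induction d with
  | zero => intro j _; simp
  | succ d ih =>
    intro j h
    have h1 := ih j (by omega)
    have h2 := hstep (j + d) (by omega)
    push_cast
    have : j + (d + 1) = (j + d) + 1 := by omega
    rw [this]
    have := ih j (by omega)
    push_cast at this
    omega

-- binary-search correctness (with fuel >= hi - lo the loop runs to completion)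
theorem bsr_spec (pref : List Int) (limit : Int) :
    ∀ (fuel lo hi : Nat), hi - lo ≤ fuel → lo ≤ hi → pref.getD lo 0 ≤ limit →
      lo ≤ bsrB pref limit fuel lo hi ∧ bsrB pref limit fuel lo hi ≤ hi ∧
      pref.getD (bsrB pref limit fuel lo hi) 0 ≤ limit ∧
      (bsrB pref limit fuel lo hi = hi ∨ ¬ pref.getD (bsrB pref limit fuel lo hi + 1) 0 ≤ limit) := by
  intro fuel
  induction fuel with
  | zero =>
    intro lo hi hf hle hlo
    have heq : lo = hi := by omega
    subst heq
    exact ⟨le_refl _, le_refl _, hlo, Or.inl rfl⟩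
  | succ fuel ih =>
    intro lo hi hf hle hlo
    by_cases h : lo < hi
    · simp only [bsrB, if_pos h]
      by_cases hq : pref.getD ((lo + hi + 1) / 2) 0 ≤ limit
      · rw [if_pos hq]
        rcases ih ((lo + hi + 1) / 2) hi (by omega) (by omega) hq with ⟨h1, h2, h3, h4⟩
        exact ⟨by omega, h2, h3, h4⟩
      · rw [if_neg hq]
        rcases ih lo ((lo + hi + 1) / 2 - 1) (by omega) (by omega) hlo with ⟨h1, h2, h3, h4⟩
        refine ⟨h1, by omega, h3, ?_⟩
        rcases h4 with h4 | h4
        · right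
          have heq : bsrB pref limit fuel lo ((lo + hi + 1) / 2 - 1) + 1 = (lo + hi + 1) / 2 := by
            omega
          rw [heq]
          exact hq
        · exact Or.inr h4
    · simp only [bsrB, if_neg h]
      exact ⟨le_refl _, by omega, hlo, Or.inl (by omega)⟩

-- within one line: the fold just extends the line while the prefix sums fit
theorem fold_line (K : Int) (lens : List Int) (pref : List Int) (base limit : Int)
    (hstep : ∀ j, j < lens.length → pref.getD (j + 1) 0 = pref.getD j 0 + lens.getD j 0 + 1)
    (hlim : limit = base + K + 1) :
    ∀ (d m : Nat) (c : Int), m + d ≤ lens.length →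
      (∀ t, m < t → t ≤ m + d → pref.getD t 0 ≤ limit) →
      (List.foldl (stepL K) (c, some (pref.getD m 0 - base - 1)) (lens.drop m)).1
        = (List.foldl (stepL K) (c, some (pref.getD (m + d) 0 - base - 1)) (lens.drop (m + d))).1 := by
  intro d
  induction d with
  | zero => intro m c _ _; rfl
  | succ d ih =>
    intro m c h hfits
    have hm : m < lens.length := by omega
    have hdrop : lens.drop m = lens.getD m 0 :: lens.drop (m + 1) := by
      rw [List.getD_eq_getElem lens 0 hm]
      exact List.drop_eq_getElem_cons hm
    have hs := hstep m hm
    have hQ : pref.getD (m + 1) 0 ≤ limit := hfits (m + 1) (by omega) (by omega)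
    have hfitw : pref.getD m 0 - base - 1 + lens.getD m 0 + 1 ≤ K := by omega
    rw [hdrop, List.foldl_cons]
    have hstepL : stepL K (c, some (pref.getD m 0 - base - 1)) (lens.getD m 0)
        = (c, some (pref.getD (m + 1) 0 - base - 1)) := by
      simp only [stepL, hfitw, if_true]
      congr 2
      omega
    rw [hstepL]
    have := ih (m + 1) c (by omega) (fun t ht1 ht2 => hfits t (by omega) (by omega))
    have hidx : m + 1 + d = m + (d + 1) := by omega
    rw [this, hidx]

-- the outer loop, line by line, equals the word-by-word greedy fold
theorem outer_main (K : Int) (lens pref : List Int)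
    (hstep : ∀ j, j < lens.length → pref.getD (j + 1) 0 = pref.getD j 0 + lens.getD j 0 + 1)
    (hfit : ∀ j, j < lens.length → lens.getD j 0 ≤ K)
    (hnn : ∀ j, j < lens.length → 0 ≤ lens.getD j 0) :
    ∀ (fuel i : Nat) (c : Int), lens.length - i ≤ fuel →
      outerB pref K lens.length fuel i c =
        if i < lens.length then
          (List.foldl (stepL K) (c + 1, some (pref.getD (i + 1) 0 - pref.getD i 0 - 1)) (lens.drop (i + 1))).1
        else c := by
  have hstep1 : ∀ j, j < lens.length → pref.getD j 0 + 1 ≤ pref.getD (j + 1) 0 := by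
    intro j hj
    have h1 := hstep j hj
    have h2 := hnn j hj
    omega
  intro fuel
  induction fuel with
  | zero =>
    intro i c h
    have hni : ¬ i < lens.length := by omega
    simp only [outerB]
    rw [if_neg hni]
  | succ fuel ih =>
    intro i c h
    by_cases hi : i < lens.length
    · simp only [outerB]
      rw [if_pos hi, if_pos hi]
      set limit := pref.getD i 0 + K + 1 with hlim
      set j := bsrB pref limit lens.length (i + 1) lens.length with hj
      have hQ1 : pref.getD (i + 1) 0 ≤ limit := by
        have h1 := hstep i hi
        have h2 := hfit i hi
        omega
      obtain ⟨h1, h2, h3, h4⟩ := bsr_spec pref limit lens.length (i + 1) lens.length (by omega) (by omega) hQ1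
      rw [← hj] at h1 h2 h3 h4
      have hrec := ih j (c + 1) (by omega)
      rw [hrec]
      have hfits : ∀ t, i + 1 < t → t ≤ (i + 1) + (j - (i + 1)) → pref.getD t 0 ≤ limit := by
        intro t ht1 ht2
        have htj : t ≤ j := by omega
        have := pref_mono pref lens.length hstep1 (j - t) t (by omega)
        have heq : t + (j - t) = j := by omega
        rw [heq] at this
        have : pref.getD t 0 ≤ pref.getD j 0 := by omega
        omega
      have hfl := fold_line K lens pref (pref.getD i 0) limit hstep hlim
        (j - (i + 1)) (i + 1) (c + 1) (by omega) hfits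
      have heq : (i + 1) + (j - (i + 1)) = j := by omega
      rw [heq] at hfl
      rw [hfl]
      by_cases hjn : j < lens.length
      · rw [if_pos hjn]
        have hQ2 : ¬ pref.getD (j + 1) 0 ≤ limit := by
          rcases h4 with h4 | h4
          · omega
          · exact h4
        have hdrop : lens.drop j = lens.getD j 0 :: lens.drop (j + 1) := by
          rw [List.getD_eq_getElem lens 0 hjn]
          exact List.drop_eq_getElem_cons hjn
        have hsj := hstep j hjn
        have hnof : ¬ (pref.getD j 0 - pref.getD i 0 - 1 + lens.getD j 0 + 1 ≤ K) := by omega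
        rw [hdrop, List.foldl_cons]
        have hstepL : stepL K (c + 1, some (pref.getD j 0 - pref.getD i 0 - 1)) (lens.getD j 0)
            = (c + 1 + 1, some (pref.getD (j + 1) 0 - pref.getD j 0 - 1)) := by
          simp only [stepL, hnof, if_false]
          congr 2
          omega
        rw [hstepL]
      · rw [if_neg hjn]
        have hjn2 : j = lens.length := by omega
        rw [hjn2, List.drop_length, List.foldl_nil]
    · simp only [outerB]
      rw [if_neg hi, if_neg hi]

-- ===== VERDICT (by name: the statement is the Claim_ definition above) =====
theorem solution_spec : Claim_equal_solution := by
  intro S K _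
  unfold Spec_solution solution solution_alt
  dsimp only
  set l := PySem.Chars.splitOn S.toList " ".toList with hl
  set lens := l.map (fun w => ((w.length : Int))) with hlens
  by_cases hany : (lens.any fun le => decide (le > K)) = true
  · have hex : ∃ p ∈ PySem.List.enumerate l, (p.2.length : Int) > K := by
      rw [hlens, List.any_map] at hany
      rcases List.any_eq_true.mp hany with ⟨w, hw, hwl⟩
      rcases List.getElem_of_mem hw with ⟨k, hk, rfl⟩
      exact ⟨(0 + (k : Int), l[k]), (PySem.List.mem_enumerate_iff _ _ _).mpr ⟨k, hk, rfl⟩,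
        by simpa using hwl⟩
    rw [if_pos hany]
    exact solGoA_long K _ hex []
  · have hall : ∀ p ∈ PySem.List.enumerate l, ¬ ((p.2.length : Int) > K) := by
      intro p hp
      rcases (PySem.List.mem_enumerate_iff _ _ _).mp hp with ⟨k, hk, rfl⟩
      rw [hlens, List.any_map] at hany
      have h2 := List.any_eq_false.mp (Bool.of_not_eq_true hany)
      simpa using h2 l[k] (List.getElem_mem hk)
    rw [if_neg hany]
    have hprefeq : lens.foldl (fun p le => p ++ [p.getLastD 0 + le + 1]) [0] = 0 :: mkPref 0 lens := by
      have := pref_fold lens [0] (by simp)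
      simpa using this
    rw [hprefeq]
    set pref := (0 : Int) :: mkPref 0 lens with hpref
    have hstep : ∀ j, j < lens.length → pref.getD (j + 1) 0 = pref.getD j 0 + lens.getD j 0 + 1 := by
      intro j hj
      exact mkPref_succ lens 0 j hj
    have hfit : ∀ j, j < lens.length → lens.getD j 0 ≤ K := by
      intro j hj
      have hm : lens.getD j 0 ∈ lens := by
        rw [List.getD_eq_getElem _ 0 hj]
        exact List.getElem_mem hj
      have h2 := List.any_eq_false.mp (Bool.of_not_eq_true hany) _ hm
      simpa using h2
    have hnn : ∀ j, j < lens.length → 0 ≤ lens.getD j 0 := by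
      intro j hj
      have hm : lens.getD j 0 ∈ lens := by
        rw [List.getD_eq_getElem _ 0 hj]
        exact List.getElem_mem hj
      rw [hlens] at hm
      rcases List.mem_map.mp hm with ⟨w, _, hw⟩
      rw [← hw]
      positivity
    rcases hll : l with _ | ⟨v, rest⟩
    · -- empty word list: both sides are 0
      rw [hll] at hlens
      simp [solGoA, PySem.List.enumerate, outerB]
    · have hlenc : lens = ((v.length : Int)) :: rest.map (fun w => ((w.length : Int))) := by
        rw [hlens, hll]; rfl
      -- A side
      rw [PySem.List.enumerate_cons]
      have hv : ¬ ((v.length : Int) > K) := by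
        have := hall (0, v) (by rw [hll, PySem.List.enumerate_cons]; exact List.mem_cons_self)
        simpa using this
      have hrest : ∀ p ∈ PySem.List.enumerate rest 1, ¬ ((p.2.length : Int) > K) := by
        intro p hp
        exact hall p (by rw [hll, PySem.List.enumerate_cons]; exact List.mem_cons_of_mem _ hp)
      simp only [solGoA, hv, if_false, List.length_nil, gt_iff_lt, lt_irrefl, if_false,
        List.nil_append]
      have hinv := solGoA_inv K (PySem.List.enumerate rest 1) hrest [] v
      simp only [List.nil_append] at hinv
      rw [show ((([] : List (List Char)).length : Int) + 1) = 1 from by simp] at hinv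
      have h01 : PySem.List.enumerate rest ((0 : Int) + 1) = PySem.List.enumerate rest 1 := by
        norm_num
      have hms : List.map (fun p : Int × List Char => ((p.2.length : Int))) (PySem.List.enumerate rest 1)
          = rest.map (fun w => ((w.length : Int))) := by
        rw [show (fun p : Int × List Char => ((p.2.length : Int)))
            = (fun w : List Char => ((w.length : Int))) ∘ (fun p : Int × List Char => p.2) from rfl,
          ← List.map_map, PySem.List.map_snd_enumerate]
      rw [h01, hinv, hms]
      -- B side
      have hn0 : 0 < lens.length := by rw [hlenc]; simp
      have hlw : l.length = lens.length := by simp [hlens]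
      rw [hll] at hlw
      have hmain := outer_main K lens pref hstep hfit hnn lens.length 0 0 (by omega)
      rw [if_pos hn0] at hmain
      rw [hlw, hmain]
      have hp1 : pref.getD (0 + 1) 0 - pref.getD 0 0 - 1 = (v.length : Int) := by
        have hs0 := hstep 0 hn0
        have hg0 : lens.getD 0 0 = (v.length : Int) := by rw [hlenc]; rfl
        have hp0 : pref.getD 0 0 = 0 := by rw [hpref]; rfl
        rw [hg0] at hs0
        omega
      rw [hp1]
      have hdrop1 : lens.drop (0 + 1) = rest.map (fun w => ((w.length : Int))) := by
        rw [hlenc]; rfl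
      rw [hdrop1]
      norm_num
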